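-- pv_equiv track=rewrite | github.com/zackmdavis/Finetooth | core/votable.py | _render_scored_substring
-- ===== SOURCE A (Python) =====
-- from typing import List, Optional, Tuple, Union, Any
--
-- def _render_scored_substring(scored_characters: List[Tuple[str, int, int]]) -> str:
--     join_to_render_partial = []
--     value_at_index = None
--     mark_at_index = None
--     open_span = False
--     for character, value, mark in scored_characters:
--         if value == value_at_index and mark == mark_at_index:
--             join_to_render_partial.append(character)
--         else:
--             if open_span:
--                 join_to_render_partial.append('</span>')
--                 open_span = False
--             join_to_render_partial.append(
--                 '<span title="score: {0}" data-value="{0}" data-mark="{1}">'.format(value, mark)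
--             )
--             open_span = True
--             value_at_index = value
--             mark_at_index = mark
--             join_to_render_partial.append(character)
--     if open_span:
--         join_to_render_partial.append('</span>')
--     return ''.join(join_to_render_partial)
-- ===== SOURCE B (Python) =====
-- def _render_scored_substring(scored_characters):
--     # Run-based rewrite: precompute maximal (value, mark) runs, render each run
--     # as open-span + joined text + close-span; no open_span/value_at_index state.
--     parts = []
--     i, n = 0, len(scored_characters)
--     while i < n:
--         _, value, mark = scored_characters[i]
--         j = i + 1
--         while j < n and scored_characters[j][1] == value and scored_characters[j][2] == mark:
--             j += 1
--         parts.append(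
--             '<span title="score: {0}" data-value="{0}" data-mark="{1}">'.format(value, mark)
--         )
--         parts.append(''.join(t[0] for t in scored_characters[i:j]))
--         parts.append('</span>')
--         i = j
--     return ''.join(parts)
-- ===== Notes on version B (the rewrite author's own statement) =====
-- stated objective: simpler
-- what changed: Replaced the character-by-character state machine (value_at_index/mark_at_index/open_span flags deciding when to close and reopen spans) with a run decomposition: an index scan finds each maximal (value, mark) run, which is rendered as open-span + joined run text + close-span with no carried state.
import Mathlib
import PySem

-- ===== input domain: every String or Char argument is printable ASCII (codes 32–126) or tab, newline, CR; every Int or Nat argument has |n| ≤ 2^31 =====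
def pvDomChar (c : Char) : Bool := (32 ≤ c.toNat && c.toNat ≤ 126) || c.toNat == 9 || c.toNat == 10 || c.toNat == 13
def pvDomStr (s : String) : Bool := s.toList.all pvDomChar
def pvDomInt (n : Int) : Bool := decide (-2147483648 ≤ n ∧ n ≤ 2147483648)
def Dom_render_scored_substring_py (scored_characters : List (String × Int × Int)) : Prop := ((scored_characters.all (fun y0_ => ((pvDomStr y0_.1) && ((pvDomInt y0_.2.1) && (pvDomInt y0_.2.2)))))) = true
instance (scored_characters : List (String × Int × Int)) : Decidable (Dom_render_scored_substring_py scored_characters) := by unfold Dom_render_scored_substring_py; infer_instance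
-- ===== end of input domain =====

-- B replaces A's per-character open-span state machine with a run decomposition
-- (maximal (value, mark) runs rendered whole); objective: simpler.

-- ===== PORT A =====
def pvSpanOpen (v m : Int) : String :=
  "<span title=\"score: " ++ PySem.Int.toStr v ++ "\" data-value=\"" ++ PySem.Int.toStr v
    ++ "\" data-mark=\"" ++ PySem.Int.toStr m ++ "\">"

-- the for-loop of A over (parts, value_at_index, mark_at_index, open_span)
def pvALoop : List (String × Int × Int) → List String → Option Int → Option Int → Bool → List String
  | [], parts, _, _, os => if os then parts ++ ["</span>"] else parts
  | (c, v, m) :: rest, parts, vo, mo, os =>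
    if vo = some v ∧ mo = some m then
      pvALoop rest (parts ++ [c]) vo mo os
    else
      pvALoop rest ((if os then parts ++ ["</span>"] else parts) ++ [pvSpanOpen v m, c])
        (some v) (some m) true

def render_scored_substring_py (scored_characters : List (String × Int × Int)) : String :=
  PySem.Str.join "" (pvALoop scored_characters [] none none false)

-- ===== PORT B =====
def pvSameKey (v m : Int) (t : String × Int × Int) : Bool := t.2.1 == v && t.2.2 == m

-- B's outer while loop: one recursive step per maximal (value, mark) run,
-- the inner index scan ported as takeWhile/dropWhile of the same predicate
def pvBRuns : List (String × Int × Int) → List String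
  | [] => []
  | (c, v, m) :: rest =>
    pvSpanOpen v m
      :: PySem.Str.join "" (c :: (rest.takeWhile (pvSameKey v m)).map (·.1))
      :: "</span>"
      :: pvBRuns (rest.dropWhile (pvSameKey v m))
termination_by l => l.length
decreasing_by
  simp only [List.length_cons]
  have := List.length_dropWhile_le (pvSameKey v m) rest
  omega

def render_scored_substring_py_alt (scored_characters : List (String × Int × Int)) : String :=
  PySem.Str.join "" (pvBRuns scored_characters)

-- ===== PRECONDITION & SPEC =====
def Spec_render_scored_substring_py (scored_characters : List (String × Int × Int)) (out : String) : Prop := out = render_scored_substring_py_alt scored_characters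
instance (scored_characters : List (String × Int × Int)) (out : String) : Decidable (Spec_render_scored_substring_py scored_characters out) := by unfold Spec_render_scored_substring_py; infer_instance

-- ===== CLAIM (what is proved, stated in full; the proofs are below) =====
def Claim_equal_render_scored_substring_py : Prop := ∀ (scored_characters : List (String × Int × Int)), Dom_render_scored_substring_py scored_characters → Spec_render_scored_substring_py scored_characters (render_scored_substring_py scored_characters)

-- ===== LEMMAS AND PROOFS =====


lemma pv_chjoin (ps : List (List Char)) : PySem.Chars.join [] ps = ps.flatten := by
  induction ps with
  | nil => simp [PySem.Chars.join_nil]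
  | cons p rest ih =>
    cases rest with
    | nil => simp [PySem.Chars.join, List.intercalate]
    | cons q r => rw [PySem.Chars.join_cons_cons]; simp [ih]

lemma pv_join_toList (parts : List String) :
    (PySem.Str.join "" parts).toList = (parts.map String.toList).flatten := by
  rw [PySem.Str.toList_join]
  simpa using pv_chjoin (parts.map String.toList)

lemma pv_loopA (l : List (String × Int × Int)) :
    ∀ (parts : List String) (v m : Int),
      ((pvALoop l parts (some v) (some m) true).map String.toList).flatten =
        (parts.map String.toList).flatten
          ++ (((l.takeWhile (pvSameKey v m)).map (·.1)).map String.toList).flatten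
          ++ "</span>".toList
          ++ ((pvBRuns (l.dropWhile (pvSameKey v m))).map String.toList).flatten := by
  induction l with
  | nil => intro parts v m; simp [pvALoop, pvBRuns]
  | cons hd rest ih =>
    intro parts v m
    obtain ⟨c, vh, mh⟩ := hd
    by_cases h : v = vh ∧ m = mh
    · obtain ⟨rfl, rfl⟩ := h
      rw [show pvALoop ((c, v, m) :: rest) parts (some v) (some m) true
            = pvALoop rest (parts ++ [c]) (some v) (some m) true by
          simp [pvALoop]]
      rw [ih]
      simp [pvSameKey]
    · have hb : pvSameKey v m (c, vh, mh) = false := by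
        simp only [pvSameKey, Bool.and_eq_false_iff, beq_eq_false_iff_ne]
        omega
      have hne : ¬ ((some v = some vh) ∧ (some m = some mh)) := by
        simp only [Option.some_inj]; exact h
      rw [show pvALoop ((c, vh, mh) :: rest) parts (some v) (some m) true
            = pvALoop rest (parts ++ ["</span>", pvSpanOpen vh mh, c])
                (some vh) (some mh) true by
          rw [pvALoop, if_neg hne]; simp]
      rw [ih]
      rw [show ((c, vh, mh) :: rest).takeWhile (pvSameKey v m) = [] by
            simp [List.takeWhile_cons, hb],
          show ((c, vh, mh) :: rest).dropWhile (pvSameKey v m) = (c, vh, mh) :: rest by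
            simp [List.dropWhile_cons, hb]]
      rw [show pvBRuns ((c, vh, mh) :: rest)
            = pvSpanOpen vh mh
                :: PySem.Str.join "" (c :: (rest.takeWhile (pvSameKey vh mh)).map (·.1))
                :: "</span>"
                :: pvBRuns (rest.dropWhile (pvSameKey vh mh)) by
          rw [pvBRuns]]
      simp [pv_chjoin]

-- ===== VERDICT (by name: the statement is the Claim_ definition above) =====
theorem render_scored_substring_py_spec : Claim_equal_render_scored_substring_py := by
  intro scs _
  unfold Spec_render_scored_substring_py render_scored_substring_py render_scored_substring_py_alt
  apply String.toList_inj.mp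
  cases scs with
  | nil => simp [pvALoop, pvBRuns]
  | cons hd rest =>
    obtain ⟨c, v, m⟩ := hd
    rw [show pvALoop ((c, v, m) :: rest) [] none none false
          = pvALoop rest [pvSpanOpen v m, c] (some v) (some m) true by
        simp [pvALoop]]
    rw [pv_join_toList, pv_join_toList, pv_loopA]
    rw [show pvBRuns ((c, v, m) :: rest)
          = pvSpanOpen v m
              :: PySem.Str.join "" (c :: (rest.takeWhile (pvSameKey v m)).map (·.1))
              :: "</span>"
              :: pvBRuns (rest.dropWhile (pvSameKey v m)) by
        rw [pvBRuns]]
    simp [pv_chjoin]
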